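-- pv_equiv track=rewrite | github.com/Deferf/Summation-Transformer | train_strictish_h2_d6_singlecarry_from_scratch.py | compute_targets
-- ===== SOURCE A (Python) =====
-- from typing import List, Tuple
--
-- def compute_targets(a: int, b: int) -> Tuple[List[int], List[int], List[int], List[int]]:
--     a_digits = [int(ch) for ch in reversed(f"{a:010d}")]
--     b_digits = [int(ch) for ch in reversed(f"{b:010d}")]
--
--     d1_cols: List[int] = []
--     d2_cols: List[int] = []
--     carry_in_cols: List[int] = []
--     y_pairs: List[int] = []
--
--     carry_in = 0
--     for i in range(11):
--         d1 = a_digits[i] if i < 10 else 0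
--         d2 = b_digits[i] if i < 10 else 0
--         d1_cols.append(d1)
--         d2_cols.append(d2)
--         carry_in_cols.append(carry_in)
--
--         total = d1 + d2 + carry_in
--         out_digit = total % 10
--         carry_out = total // 10
--         y_pairs.append(10 * carry_out + out_digit)
--         carry_in = carry_out
--
--     return d1_cols, d2_cols, carry_in_cols, y_pairs
-- ===== SOURCE B (Python) =====
-- def compute_targets(a, b):
--     s = a + b
--     d1_cols = [a // 10**i % 10 for i in range(10)] + [0]
--     d2_cols = [b // 10**i % 10 for i in range(10)] + [0]
--     carry_in_cols = [(a % 10**i + b % 10**i) // 10**i for i in range(11)]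
--     y_pairs = [10 * ((a % 10**(i + 1) + b % 10**(i + 1)) // 10**(i + 1)) + s // 10**i % 10
--                for i in range(11)]
--     return d1_cols, d2_cols, carry_in_cols, y_pairs
-- ===== Notes on version B (the rewrite author's own statement) =====
-- stated objective: simpler
-- what changed: B replaces the string formatting/parsing and the sequential carry-threading loop with four independent closed-form comprehensions: each digit, carry-in and output column is computed directly by modular arithmetic (carry_in[i] = (a%10^i + b%10^i)//10^i), with no digit strings and no loop state.
import Mathlib
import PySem

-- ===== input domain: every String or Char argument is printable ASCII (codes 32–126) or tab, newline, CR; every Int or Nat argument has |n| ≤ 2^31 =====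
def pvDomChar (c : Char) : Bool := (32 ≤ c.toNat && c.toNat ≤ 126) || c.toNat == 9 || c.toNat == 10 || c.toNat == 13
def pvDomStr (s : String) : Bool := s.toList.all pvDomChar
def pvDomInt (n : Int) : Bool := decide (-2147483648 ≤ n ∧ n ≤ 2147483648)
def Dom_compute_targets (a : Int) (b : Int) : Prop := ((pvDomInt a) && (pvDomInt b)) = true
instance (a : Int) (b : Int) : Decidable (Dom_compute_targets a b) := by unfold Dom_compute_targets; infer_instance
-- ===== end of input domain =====

-- B computes each digit/carry/output column by a closed-form modular-arithmetic formula instead of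
-- A's string formatting + sequential carry-threading loop (objective: simpler; same cost).

-- ===== PORT A =====

def pvDecDigitsLE (n : Nat) : List Char :=
  if h : n < 10 then [Char.ofNat (48 + n)]
  else Char.ofNat (48 + n % 10) :: pvDecDigitsLE (n / 10)
  termination_by n
  decreasing_by exact Nat.div_lt_self (by omega) (by omega)

def pvIntOfCh (c : Char) : Int := (PySem.Int.ofStr? (String.ofList [c])).getD 0

def pvFormat010 (n : Int) : List Char :=
  let ds := (pvDecDigitsLE n.natAbs).reverse
  if n < 0 then '-' :: (List.replicate (9 - ds.length) '0' ++ ds)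
  else List.replicate (10 - ds.length) '0' ++ ds

def compute_targets (a : Int) (b : Int) : List Int × List Int × List Int × List Int :=
  let a_digits := ((pvFormat010 a).reverse).map pvIntOfCh
  let b_digits := ((pvFormat010 b).reverse).map pvIntOfCh
  let r := (PySem.List.pyRange 0 11 1).foldl
    (fun (st : List Int × List Int × List Int × List Int × Int) (i : Int) =>
      let d1 := if i < 10 then PySem.List.pyGetD a_digits i 0 else 0
      let d2 := if i < 10 then PySem.List.pyGetD b_digits i 0 else 0
      let total := d1 + d2 + st.2.2.2.2
      let out_digit := PySem.Int.mod total 10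
      let carry_out := PySem.Int.floordiv total 10
      (st.1 ++ [d1], st.2.1 ++ [d2], st.2.2.1 ++ [st.2.2.2.2],
       st.2.2.2.1 ++ [10 * carry_out + out_digit], carry_out))
    ([], [], [], [], 0)
  (r.1, r.2.1, r.2.2.1, r.2.2.2.1)

-- ===== PORT B =====

def compute_targets_alt (a : Int) (b : Int) : List Int × List Int × List Int × List Int :=
  let s := a + b
  let pw : Int → Int := fun i => (10 : Int) ^ i.toNat
  let d1_cols := ((PySem.List.pyRange 0 10 1).map
    (fun i => PySem.Int.mod (PySem.Int.floordiv a (pw i)) 10)) ++ [0]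
  let d2_cols := ((PySem.List.pyRange 0 10 1).map
    (fun i => PySem.Int.mod (PySem.Int.floordiv b (pw i)) 10)) ++ [0]
  let carry_in_cols := (PySem.List.pyRange 0 11 1).map
    (fun i => PySem.Int.floordiv (PySem.Int.mod a (pw i) + PySem.Int.mod b (pw i)) (pw i))
  let y_pairs := (PySem.List.pyRange 0 11 1).map
    (fun i => 10 * PySem.Int.floordiv (PySem.Int.mod a (pw (i + 1)) + PySem.Int.mod b (pw (i + 1))) (pw (i + 1))
              + PySem.Int.mod (PySem.Int.floordiv s (pw i)) 10)
  (d1_cols, d2_cols, carry_in_cols, y_pairs)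

-- ===== PRECONDITION & SPEC =====
-- Pre_ excludes negative a or b: there Python raises ValueError (int('-') on the reversed sign character).
def Pre_compute_targets (a : Int) (b : Int) : Prop := 0 ≤ a ∧ 0 ≤ b
instance (a : Int) (b : Int) : Decidable (Pre_compute_targets a b) := by unfold Pre_compute_targets; infer_instance
def pvWitness_compute_targets : Int × Int := (123, 4567)

def Spec_compute_targets (a : Int) (b : Int) (out : List Int × List Int × List Int × List Int) : Prop := out = compute_targets_alt a b
instance (a : Int) (b : Int) (out : List Int × List Int × List Int × List Int) : Decidable (Spec_compute_targets a b out) := by unfold Spec_compute_targets; infer_instance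

-- ===== CLAIM (what is proved, stated in full; the proofs are below) =====
def Claim_equal_compute_targets : Prop := ∀ (a : Int) (b : Int), Dom_compute_targets a b → Pre_compute_targets a b → Spec_compute_targets a b (compute_targets a b)

-- ===== LEMMAS AND PROOFS =====

-- spec-side digit and carry-in formulas (Nat level)

def pvDg (m i : Nat) : Nat := m / 10 ^ i % 10

lemma pvDg_succ (m i : Nat) : pvDg m (i + 1) = pvDg (m / 10) i := by
  unfold pvDg
  rw [pow_succ', ← Nat.div_div_eq_div_mul]

lemma pvDg_zero_of_lt (m i : Nat) (h : m < 10) : pvDg m (i + 1) = 0 := by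
  unfold pvDg
  rw [Nat.div_eq_of_lt (lt_of_lt_of_le h (by exact Nat.le_self_pow (by omega) 10))]

lemma pvDecPad : ∀ (k m : Nat), 0 < k → m < 10 ^ k →
    pvDecDigitsLE m ++ List.replicate (k - (pvDecDigitsLE m).length) '0'
      = (List.range k).map (fun i => Char.ofNat (48 + pvDg m i)) := by
  intro k
  induction k with
  | zero => intro m h; omega
  | succ k ih =>
    intro m _ hm
    rw [List.range_succ_eq_map, List.map_cons, List.map_map]
    by_cases h10 : m < 10
    · rw [pvDecDigitsLE, dif_pos h10]
      simp only [List.singleton_append, List.length_singleton]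
      congr 1
      · unfold pvDg; rw [pow_zero, Nat.div_one, Nat.mod_eq_of_lt h10]
      · rw [Nat.add_sub_cancel]
        rw [List.map_congr_left (g := fun _ => '0') ?_, List.map_const', List.length_range]
        intro i _
        simp only [Function.comp_apply]
        rw [pvDg_zero_of_lt m i h10]
    · have hk : 0 < k := by
        by_contra hk0
        interval_cases k
        simp at hm; omega
      rw [pvDecDigitsLE, dif_neg h10]
      rw [List.cons_append, List.length_cons, Nat.succ_sub_succ]
      have hdiv : m / 10 < 10 ^ k := by
        rw [Nat.div_lt_iff_lt_mul (by omega)]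
        calc m < 10 ^ (k+1) := hm
        _ = 10 ^ k * 10 := by rw [pow_succ]
      rw [ih (m / 10) hk hdiv]
      congr 1
      · unfold pvDg; rw [pow_zero, Nat.div_one]
      · apply List.map_congr_left
        intro i _
        simp only [Function.comp_apply]
        rw [pvDg_succ]

lemma pvIntOfCh_digit (d : Nat) (hd : d < 10) : pvIntOfCh (Char.ofNat (48 + d)) = (d : Int) := by
  interval_cases d <;> decide

lemma pvDigitsEq (m : Nat) (hm : m < 10 ^ 10) :
    ((pvFormat010 (m : Int)).reverse).map pvIntOfCh
      = (List.range 10).map (fun i => (pvDg m i : Int)) := by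
  unfold pvFormat010
  rw [if_neg (not_lt.mpr (Int.natCast_nonneg m))]
  simp only [Int.natAbs_natCast, List.reverse_append, List.reverse_reverse, List.reverse_replicate,
    List.length_reverse]
  rw [pvDecPad 10 m (by norm_num) hm, List.map_map]
  apply List.map_congr_left
  intro i _
  simp only [Function.comp_apply]
  exact pvIntOfCh_digit _ (Nat.mod_lt _ (by norm_num))

def pvCin (m n i : Nat) : Nat := (m % 10 ^ i + n % 10 ^ i) / 10 ^ i

lemma pvCarry_succ (m n i : Nat) :
    (pvDg m i + pvDg n i + pvCin m n i) / 10 = pvCin m n (i + 1) := by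
  unfold pvCin pvDg
  have hp : 0 < 10 ^ i := Nat.pow_pos (by norm_num)
  rw [pow_succ, Nat.mod_mul, Nat.mod_mul, ← Nat.div_div_eq_div_mul]
  have h1 : m % 10 ^ i + 10 ^ i * (m / 10 ^ i % 10) + (n % 10 ^ i + 10 ^ i * (n / 10 ^ i % 10))
      = (m % 10 ^ i + n % 10 ^ i) + (m / 10 ^ i % 10 + n / 10 ^ i % 10) * 10 ^ i := by ring
  rw [h1, Nat.add_mul_div_right _ _ hp]
  omega

lemma pvOut (m n i : Nat) :
    (pvDg m i + pvDg n i + pvCin m n i) % 10 = pvDg (m + n) i := by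
  unfold pvCin pvDg
  have hp : 0 < 10 ^ i := Nat.pow_pos (by norm_num)
  have h : m + n = (m % 10 ^ i + n % 10 ^ i) + (m / 10 ^ i + n / 10 ^ i) * 10 ^ i := by
    conv_lhs => rw [← Nat.div_add_mod m (10 ^ i), ← Nat.div_add_mod n (10 ^ i)]
    ring
  have key : (m + n) / 10 ^ i = m / 10 ^ i + n / 10 ^ i + (m % 10 ^ i + n % 10 ^ i) / 10 ^ i := by
    conv_lhs => rw [h]
    rw [Nat.add_mul_div_right _ _ hp]
    omega
  rw [key]
  generalize m / 10 ^ i = x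
  generalize n / 10 ^ i = y
  generalize (m % 10 ^ i + n % 10 ^ i) / 10 ^ i = c
  omega

lemma pvFdCast (x : Nat) : PySem.Int.floordiv (x : Int) 10 = ((x / 10 : Nat) : Int) := by
  simp

lemma pvMdCast (x : Nat) : PySem.Int.mod (x : Int) 10 = ((x % 10 : Nat) : Int) := by
  simp

lemma pvFoldInv (m n : Nat) : ∀ (k : Nat), k ≤ 10 →
    List.foldl
      (fun (st : List Int × List Int × List Int × List Int × Int) (i : Int) =>
        (st.1 ++ [(if i < 10 then PySem.List.pyGetD (List.map (fun j => ((pvDg m j : Nat) : Int)) (List.range 10)) i 0 else 0)],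
         st.2.1 ++ [(if i < 10 then PySem.List.pyGetD (List.map (fun j => ((pvDg n j : Nat) : Int)) (List.range 10)) i 0 else 0)],
         st.2.2.1 ++ [st.2.2.2.2],
         st.2.2.2.1 ++ [10 * PySem.Int.floordiv ((if i < 10 then PySem.List.pyGetD (List.map (fun j => ((pvDg m j : Nat) : Int)) (List.range 10)) i 0 else 0) + (if i < 10 then PySem.List.pyGetD (List.map (fun j => ((pvDg n j : Nat) : Int)) (List.range 10)) i 0 else 0) + st.2.2.2.2) 10 + PySem.Int.mod ((if i < 10 then PySem.List.pyGetD (List.map (fun j => ((pvDg m j : Nat) : Int)) (List.range 10)) i 0 else 0) + (if i < 10 then PySem.List.pyGetD (List.map (fun j => ((pvDg n j : Nat) : Int)) (List.range 10)) i 0 else 0) + st.2.2.2.2) 10],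
         PySem.Int.floordiv ((if i < 10 then PySem.List.pyGetD (List.map (fun j => ((pvDg m j : Nat) : Int)) (List.range 10)) i 0 else 0) + (if i < 10 then PySem.List.pyGetD (List.map (fun j => ((pvDg n j : Nat) : Int)) (List.range 10)) i 0 else 0) + st.2.2.2.2) 10))
      ([], [], [], [], 0) (PySem.List.pyRange 0 ((k : Nat) : Int) 1)
    = ((List.range k).map (fun i => (pvDg m i : Int)),
       (List.range k).map (fun i => (pvDg n i : Int)),
       (List.range k).map (fun i => (pvCin m n i : Int)),
       (List.range k).map (fun i => ((10 * pvCin m n (i + 1) + pvDg (m + n) i : Nat) : Int)),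
       ((pvCin m n k : Nat) : Int)) := by
  intro k
  induction k with
  | zero =>
    simp [PySem.List.pyRange_one_eq_nil, pvCin]
  | succ k ih =>
    intro hk
    have hkc : ((k + 1 : Nat) : Int) = (k : Int) + 1 := by push_cast; ring
    rw [hkc, PySem.List.pyRange_one_succ_right (Int.natCast_nonneg k), List.foldl_append,
      ih (by omega)]
    simp only [List.foldl_cons, List.foldl_nil]
    have hklt : ((k : Nat) : Int) < 10 := by exact_mod_cast (by omega : k < 10)
    simp only [if_pos hklt, PySem.List.pyGetD_natCast]
    have hg1 : (List.map (fun j => ((pvDg m j : Nat) : Int)) (List.range 10)).getD k 0 = ((pvDg m k : Nat) : Int) :=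
      PySem.List.getD_map_range _ 10 k 0 (by omega)
    have hg2 : (List.map (fun j => ((pvDg n j : Nat) : Int)) (List.range 10)).getD k 0 = ((pvDg n k : Nat) : Int) :=
      PySem.List.getD_map_range _ 10 k 0 (by omega)
    have hsum : ((pvDg m k : Nat) : Int) + ((pvDg n k : Nat) : Int) + ((pvCin m n k : Nat) : Int)
        = ((pvDg m k + pvDg n k + pvCin m n k : Nat) : Int) := by push_cast; ring
    rw [hg1, hg2, hsum, pvFdCast, pvMdCast, pvCarry_succ, pvOut, List.range_succ]
    simp only [List.map_append, List.map_cons, List.map_nil]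
    push_cast
    simp

lemma pvLast (m n : Nat) (hm : m < 10 ^ 10) (hn : n < 10 ^ 10) :
    10 * pvCin m n 11 + pvDg (m + n) 10 = pvCin m n 10 := by
  unfold pvCin pvDg
  norm_num at *
  omega

lemma pvAltEq (m n : Nat) :
    compute_targets_alt (m : Int) (n : Int)
      = ((List.range 10).map (fun i => (pvDg m i : Int)) ++ [0],
         (List.range 10).map (fun i => (pvDg n i : Int)) ++ [0],
         (List.range 11).map (fun i => (pvCin m n i : Int)),
         (List.range 11).map (fun i => ((10 * pvCin m n (i + 1) + pvDg (m + n) i : Nat) : Int))) := by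
  simp only [compute_targets_alt]
  rw [PySem.List.pyRange_one 0 10, PySem.List.pyRange_one 0 11]
  norm_num [List.map_map]
  have hp : ∀ j : Nat, ((10 : Int) ^ ((j : Int)).toNat) = ((10 ^ j : Nat) : Int) := by
    intro j; rw [Int.toNat_natCast]; push_cast; ring
  have hp' : ∀ j : Nat, ((10 : Int) ^ (((j : Int)) + 1).toNat) = ((10 ^ (j + 1) : Nat) : Int) := by
    intro j
    rw [show ((j : Int)) + 1 = ((j + 1 : Nat) : Int) from by push_cast; ring, Int.toNat_natCast]
    push_cast; ring
  refine ⟨?_, ?_, ?_, ?_⟩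
  · apply List.map_congr_left; intro j hj
    simp only [Function.comp_apply, hp j]
    unfold pvDg
    push_cast
    ring
  · apply List.map_congr_left; intro j hj
    simp only [Function.comp_apply, hp j]
    unfold pvDg
    push_cast
    ring
  · apply List.map_congr_left; intro j hj
    simp only [Function.comp_apply, hp j]
    unfold pvCin
    push_cast
    ring
  · apply List.map_congr_left; intro j hj
    simp only [Function.comp_apply, hp j, hp' j]
    unfold pvCin pvDg
    push_cast
    ring

lemma pvMainEq (m n : Nat) (hm : m < 10 ^ 10) (hn : n < 10 ^ 10) :
    compute_targets (m : Int) (n : Int) = compute_targets_alt (m : Int) (n : Int) := by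
  rw [pvAltEq m n]
  unfold compute_targets
  simp only [pvDigitsEq m hm, pvDigitsEq n hn]
  have h11 : PySem.List.pyRange 0 11 1 = PySem.List.pyRange 0 (((10 : Nat)) : Int) 1 ++ [(10 : Int)] := by decide
  rw [h11, List.foldl_append, pvFoldInv m n 10 le_rfl]
  simp only [List.foldl_cons, List.foldl_nil]
  have hc := pvLast m n hm hn
  simp only [show ¬((10:Int) < 10) from by norm_num, if_false, zero_add, pvFdCast, pvMdCast,
    show (11:Nat) = 10 + 1 from rfl, List.range_succ, List.map_append, List.map_cons, List.map_nil]
  have hfin : (10:Int) * ↑(pvCin m n 10 / 10) + ↑(pvCin m n 10 % 10) = (↑(pvCin m n 10) : Int) := by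
    omega
  rw [hfin]
  norm_num [hc]

-- ===== VERDICT (by name: the statement is the Claim_ definition above) =====
theorem compute_targets_spec : Claim_equal_compute_targets := by
  intro a b hdom hpre
  obtain ⟨ha, hb⟩ := hpre
  have hd : a ≤ 2147483648 ∧ b ≤ 2147483648 := by
    simp only [Dom_compute_targets, pvDomInt, Bool.and_eq_true, decide_eq_true_eq] at hdom
    exact ⟨hdom.1.2, hdom.2.2⟩
  lift a to Nat using ha with m
  lift b to Nat using hb with n
  have hm : m < 10 ^ 10 := by
    have h1 : m ≤ 2147483648 := by exact_mod_cast hd.1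
    norm_num
    omega
  have hn : n < 10 ^ 10 := by
    have h1 : n ≤ 2147483648 := by exact_mod_cast hd.2
    norm_num
    omega
  show compute_targets (m : Int) (n : Int) = compute_targets_alt (m : Int) (n : Int)
  exact pvMainEq m n hm hn
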